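-- pv_equiv track=rewrite | github.com/Roshan3300/Python-Projects | virtual_keyboard.py | get_hovered_key
-- ===== SOURCE A (Python) =====
-- keys = [
--     ['1', '2', '3', '4', '5', '6', '7', '8', '9', '0'],
--     ['Q', 'W', 'E', 'R', 'T', 'Y', 'U', 'I', 'O', 'P'],
--     ['A', 'S', 'D', 'F', 'G', 'H', 'J', 'K', 'L', '⌫'],
--     ['Z', 'X', 'C', 'V', 'B', 'N', 'M', ' ', ',', '.']
-- ]
--
-- key_width = 85
--
-- key_height = 85
--
-- key_gap = 10
--
-- def get_hovered_key(x, y):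
--
--     for i, row in enumerate(keys):
--         for j, key in enumerate(row):
--             key_x = j * (key_width + key_gap) + 50
--             key_y = i * (key_height + key_gap) + 150
--
--             if key_x - 5 < x < key_x + key_width + 5 and key_y - 5 < y < key_y + key_height + 5:
--                 return key, key_x, key_y
--     return None, 0, 0
-- ===== SOURCE B (Python) =====
-- keys = [
--     ['1', '2', '3', '4', '5', '6', '7', '8', '9', '0'],
--     ['Q', 'W', 'E', 'R', 'T', 'Y', 'U', 'I', 'O', 'P'],
--     ['A', 'S', 'D', 'F', 'G', 'H', 'J', 'K', 'L', '⌫'],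
--     ['Z', 'X', 'C', 'V', 'B', 'N', 'M', ' ', ',', '.']
-- ]
--
-- def get_hovered_key(x, y):
--     # O(1): each key cell is an open 95x95-pitch box; compute the cell index
--     # arithmetically instead of scanning all 40 keys.
--     j, rx = divmod(x - 46, 95)
--     i, ry = divmod(y - 146, 95)
--     if 0 <= i < 4 and 0 <= j < 10 and rx <= 93 and ry <= 93:
--         return keys[i][j], j * 95 + 50, i * 95 + 150
--     return None, 0, 0
-- ===== Notes on version B (the rewrite author's own statement) =====
-- stated objective: faster
-- what changed: Replaces the 4x10 double scan over all key cells with an O(1) arithmetic computation of the candidate row/column via divmod by the 95px pitch plus a remainder check for the 5px gaps.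
import Mathlib
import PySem

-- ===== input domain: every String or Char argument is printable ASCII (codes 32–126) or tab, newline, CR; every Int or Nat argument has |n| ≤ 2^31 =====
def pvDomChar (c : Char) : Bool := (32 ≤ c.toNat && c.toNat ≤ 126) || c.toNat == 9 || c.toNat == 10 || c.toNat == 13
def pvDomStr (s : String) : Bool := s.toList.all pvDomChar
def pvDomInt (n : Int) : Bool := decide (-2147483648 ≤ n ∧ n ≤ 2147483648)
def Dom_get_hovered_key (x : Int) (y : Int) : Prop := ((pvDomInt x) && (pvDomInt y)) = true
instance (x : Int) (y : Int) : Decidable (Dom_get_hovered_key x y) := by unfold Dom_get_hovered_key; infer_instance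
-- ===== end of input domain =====

-- B replaces A's scan over all 40 key cells by O(1) divmod arithmetic on the 95px key pitch.

-- ===== PORT A =====
def pvKeys : List (List String) :=
  [["1", "2", "3", "4", "5", "6", "7", "8", "9", "0"],
   ["Q", "W", "E", "R", "T", "Y", "U", "I", "O", "P"],
   ["A", "S", "D", "F", "G", "H", "J", "K", "L", "⌫"],
   ["Z", "X", "C", "V", "B", "N", "M", " ", ",", "."]]

-- inner 'for j, key in enumerate(row)' with early return
def pvScanRow (x y : Int) (i : Int) (row : List String) (j : Int) : Option (String × Int × Int) :=
  match row with
  | [] => none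
  | key :: rest =>
    let key_x : Int := j * (85 + 10) + 50
    let key_y : Int := i * (85 + 10) + 150
    if key_x - 5 < x ∧ x < key_x + 85 + 5 ∧ key_y - 5 < y ∧ y < key_y + 85 + 5 then
      some (key, key_x, key_y)
    else pvScanRow x y i rest (j + 1)

-- outer 'for i, row in enumerate(keys)' with early return
def pvScanRows (x y : Int) (rows : List (List String)) (i : Int) : Option (String × Int × Int) :=
  match rows with
  | [] => none
  | row :: rest =>
    match pvScanRow x y i row 0 with
    | some r => some r
    | none => pvScanRows x y rest (i + 1)

def get_hovered_key (x : Int) (y : Int) : Option String × Int × Int :=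
  match pvScanRows x y pvKeys 0 with
  | some (key, kx, ky) => (some key, kx, ky)
  | none => (none, 0, 0)

-- ===== PORT B =====
def pvKeysB : List (List String) :=
  [["1", "2", "3", "4", "5", "6", "7", "8", "9", "0"],
   ["Q", "W", "E", "R", "T", "Y", "U", "I", "O", "P"],
   ["A", "S", "D", "F", "G", "H", "J", "K", "L", "⌫"],
   ["Z", "X", "C", "V", "B", "N", "M", " ", ",", "."]]

def get_hovered_key_alt (x : Int) (y : Int) : Option String × Int × Int :=
  let j := PySem.Int.floordiv (x - 46) 95
  let rx := PySem.Int.mod (x - 46) 95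
  let i := PySem.Int.floordiv (y - 146) 95
  let ry := PySem.Int.mod (y - 146) 95
  if 0 ≤ i ∧ i < 4 ∧ 0 ≤ j ∧ j < 10 ∧ rx ≤ 93 ∧ ry ≤ 93 then
    -- keys[i][j]; indices are in range whenever the guard holds
    match PySem.List.pyGet? pvKeysB i with
    | some row =>
      match PySem.List.pyGet? row j with
      | some key => (some key, j * 95 + 50, i * 95 + 150)
      | none => (none, 0, 0)
    | none => (none, 0, 0)
  else (none, 0, 0)

-- ===== PRECONDITION & SPEC =====
def Spec_get_hovered_key (x : Int) (y : Int) (out : Option String × Int × Int) : Prop := out = get_hovered_key_alt x y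
instance (x : Int) (y : Int) (out : Option String × Int × Int) : Decidable (Spec_get_hovered_key x y out) := by unfold Spec_get_hovered_key; infer_instance

-- ===== CLAIM (what is proved, stated in full; the proofs are below) =====
def Claim_equal_get_hovered_key : Prop := ∀ (x : Int) (y : Int), Dom_get_hovered_key x y → Spec_get_hovered_key x y (get_hovered_key x y)

-- ===== LEMMAS AND PROOFS =====

-- A row scan finds nothing when no cell of the row is hit.
lemma pvScanRow_none (x y i : Int) (row : List String) : ∀ j : Int,
    (∀ k : Int, j ≤ k → k < j + (row.length : Int) →
      ¬((k * 95 + 45 < x ∧ x < k * 95 + 140) ∧ (i * 95 + 145 < y ∧ y < i * 95 + 240))) →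
    pvScanRow x y i row j = none := by
  induction row with
  | nil => intro j h; rfl
  | cons key rest ih =>
    intro j h
    simp only [pvScanRow]
    rw [if_neg]
    · exact ih (j + 1) (fun k hk1 hk2 => by
        refine h k (by omega) ?_
        simp only [List.length_cons] at hk2 ⊢
        push_cast at hk2 ⊢
        omega)
    · have hj := h j (le_refl j) (by simp only [List.length_cons]; push_cast; omega)
      omega

-- A row scan starting at column j returns the cell j+t when that cell is hit.
lemma pvScanRow_hit (x y i : Int) (row : List String) : ∀ (j t : Int),
    0 ≤ t → t < (row.length : Int) →
    ((j + t) * 95 + 45 < x ∧ x < (j + t) * 95 + 140) →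
    (i * 95 + 145 < y ∧ y < i * 95 + 240) →
    pvScanRow x y i row j = some (row.getD t.toNat "", (j + t) * 95 + 50, i * 95 + 150) := by
  induction row with
  | nil => intro j t h0 h1 _ _; simp only [List.length_nil] at h1; omega
  | cons key rest ih =>
    intro j t h0 hlt hx hy
    simp only [pvScanRow]
    by_cases ht : t = 0
    · subst ht
      rw [if_pos (by omega)]
      simp only [show (0 : Int).toNat = 0 from rfl, List.getD_cons_zero]
      refine congrArg some ?_
      rw [Prod.mk.injEq, Prod.mk.injEq]
      refine ⟨rfl, by ring, by ring⟩
    · rw [if_neg (by omega)]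
      have hji : j + 1 + (t - 1) = j + t := by ring
      have hrec := ih (j + 1) (t - 1) (by omega)
        (by simp only [List.length_cons] at hlt ⊢; push_cast at hlt ⊢; omega)
        (by rw [hji]; exact hx) hy
      rw [hji] at hrec
      rw [hrec]
      have htn : t.toNat = (t - 1).toNat + 1 := by omega
      rw [htn]
      simp

-- ===== VERDICT (by name: the statement is the Claim_ definition above) =====
set_option maxRecDepth 8192 in
set_option maxHeartbeats 1000000 in
theorem get_hovered_key_spec : Claim_equal_get_hovered_key := by
  intro x y _
  show get_hovered_key x y = get_hovered_key_alt x y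
  rw [get_hovered_key_alt]
  simp only [PySem.Int.floordiv_eq_ediv_of_pos (show (0:Int) < 95 by norm_num),
      PySem.Int.mod_eq_emod_of_pos (show (0:Int) < 95 by norm_num)]
  split_ifs with h
  · obtain ⟨hi0, hi4, hj0, hj10, hrx, hry⟩ := h
    generalize hjdef : (x - 46) / 95 = j at hj0 hj10 ⊢
    generalize hidef : (y - 146) / 95 = i at hi0 hi4 ⊢
    have hx1 : j * 95 + 45 < x := by omega
    have hx2 : x < j * 95 + 140 := by omega
    have hy1 : i * 95 + 145 < y := by omega
    have hy2 : y < i * 95 + 240 := by omega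
    interval_cases i
    · have e0 := pvScanRow_hit x y 0 ["1","2","3","4","5","6","7","8","9","0"] 0 j hj0
        (by norm_num; omega) (by constructor <;> omega) (by omega)
      norm_num [get_hovered_key, pvScanRows, pvKeys, e0]
      interval_cases j <;> decide
    · have e0 := pvScanRow_none x y 0 ["1","2","3","4","5","6","7","8","9","0"] 0
        (fun k _ _ => by omega)
      have e1 := pvScanRow_hit x y 1 ["Q","W","E","R","T","Y","U","I","O","P"] 0 j hj0
        (by norm_num; omega) (by constructor <;> omega) (by omega)
      norm_num [get_hovered_key, pvScanRows, pvKeys, e0, e1]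
      interval_cases j <;> decide
    · have e0 := pvScanRow_none x y 0 ["1","2","3","4","5","6","7","8","9","0"] 0
        (fun k _ _ => by omega)
      have e1 := pvScanRow_none x y 1 ["Q","W","E","R","T","Y","U","I","O","P"] 0
        (fun k _ _ => by omega)
      have e2 := pvScanRow_hit x y 2 ["A","S","D","F","G","H","J","K","L","⌫"] 0 j hj0
        (by norm_num; omega) (by constructor <;> omega) (by omega)
      norm_num [get_hovered_key, pvScanRows, pvKeys, e0, e1, e2]
      interval_cases j <;> decide
    · have e0 := pvScanRow_none x y 0 ["1","2","3","4","5","6","7","8","9","0"] 0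
        (fun k _ _ => by omega)
      have e1 := pvScanRow_none x y 1 ["Q","W","E","R","T","Y","U","I","O","P"] 0
        (fun k _ _ => by omega)
      have e2 := pvScanRow_none x y 2 ["A","S","D","F","G","H","J","K","L","⌫"] 0
        (fun k _ _ => by omega)
      have e3 := pvScanRow_hit x y 3 ["Z","X","C","V","B","N","M"," ",",","."] 0 j hj0
        (by norm_num; omega) (by constructor <;> omega) (by omega)
      norm_num [get_hovered_key, pvScanRows, pvKeys, e0, e1, e2, e3]
      interval_cases j <;> decide
  · have e0 := pvScanRow_none x y 0 ["1","2","3","4","5","6","7","8","9","0"] 0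
      (fun k hk1 hk2 => by norm_num at hk2; omega)
    have e1 := pvScanRow_none x y 1 ["Q","W","E","R","T","Y","U","I","O","P"] 0
      (fun k hk1 hk2 => by norm_num at hk2; omega)
    have e2 := pvScanRow_none x y 2 ["A","S","D","F","G","H","J","K","L","⌫"] 0
      (fun k hk1 hk2 => by norm_num at hk2; omega)
    have e3 := pvScanRow_none x y 3 ["Z","X","C","V","B","N","M"," ",",","."] 0
      (fun k hk1 hk2 => by norm_num at hk2; omega)
    norm_num [get_hovered_key, pvScanRows, pvKeys, e0, e1, e2, e3]
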